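-- pv_equiv track=rewrite | github.com/HussamAnawr/sap_exam | pass69.py | all_combinations
-- ===== SOURCE A (Python) =====
-- def all_combinations(arr):
--     result = []
--
--     def backtrack(start, current):
--         # Add to results if length >= 2
--         if len(current) >= 2:
--             result.append(current[:])
--
--         # Generate further combinations
--         for i in range(start, len(arr)):
--             current.append(arr[i])
--             backtrack(i + 1, current)  # move to next index
--             current.pop()  # backtrack
--
--     backtrack(0, [])
--     return result
-- ===== SOURCE B (Python) =====
-- def all_combinations(arr):
--     # Explicit-stack DFS instead of recursion; children pushed in reverse so
--     # the lowest index pops first, reproducing A's preorder exactly.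
--     result = []
--     stack = [([], 0)]
--     while stack:
--         current, start = stack.pop()
--         if len(current) >= 2:
--             result.append(current)
--         for i in reversed(range(start, len(arr))):
--             stack.append((current + [arr[i]], i + 1))
--     return result
-- ===== Notes on version B (the rewrite author's own statement) =====
-- stated objective: alternative
-- what changed: Replaced the nested recursive backtracking (recursion + in-place append/pop on a shared list) with an iterative DFS over an explicit stack of (current, start) pairs, pushing children in reverse index order to preserve the preorder.
import Mathlib
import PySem

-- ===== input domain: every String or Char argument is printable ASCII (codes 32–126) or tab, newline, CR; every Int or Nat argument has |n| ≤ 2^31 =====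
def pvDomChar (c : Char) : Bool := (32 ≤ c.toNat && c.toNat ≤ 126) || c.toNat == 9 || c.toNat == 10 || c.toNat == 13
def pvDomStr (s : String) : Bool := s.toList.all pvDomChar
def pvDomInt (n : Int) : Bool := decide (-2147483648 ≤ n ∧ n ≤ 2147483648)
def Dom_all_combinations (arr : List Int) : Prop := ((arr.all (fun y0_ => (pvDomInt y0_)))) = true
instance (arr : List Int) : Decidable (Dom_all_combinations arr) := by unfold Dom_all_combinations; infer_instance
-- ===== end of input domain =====

-- B replaces A's recursive backtracking with an iterative DFS over an explicit
-- stack of (current, start) pairs; same return value (A's in-place mutation of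
-- its local `current` is not caller-observable).

-- ===== PORT A =====
-- A's nested `backtrack`: emit current if len >= 2, then loop i over
-- range(start, len(arr)) recursing with current + [arr[i]] and i+1.
mutual
def btA (arr : List Int) (start : Nat) (current : List Int) : List (List Int) :=
  (if 2 ≤ current.length then [current] else []) ++ btLoop arr start current
  termination_by (arr.length - start, 1)
-- the `for i in range(start, len(arr))` loop of backtrack
def btLoop (arr : List Int) (i : Nat) (current : List Int) : List (List Int) :=
  if i < arr.length then
    btA arr (i + 1) (current ++ [arr.getD i 0]) ++ btLoop arr (i + 1) current
  else []
  termination_by (arr.length - i, 0)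
end

def all_combinations (arr : List Int) : List (List Int) := btA arr 0 []

-- ===== PORT B =====
-- the pushes of one pop: reversed(range(start, n)) pushed LIFO = popped in
-- increasing i order, so with the stack top at the list head the new stack is
-- this list prepended.
def stackChildren (arr : List Int) (current : List Int) (s : Nat) :
    List (List Int × Nat) :=
  (List.range' s (arr.length - s)).map (fun i => (current ++ [arr.getD i 0], i + 1))

-- termination measure for the while loop: each pop removes 2^(n-s) and its
-- pushes add at most 2^(n-s) - 1
def pvMeasure (arr : List Int) (st : List (List Int × Nat)) : Nat :=
  (st.map (fun p => 2 ^ (arr.length - p.2))).sum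

-- needed by runStack's termination proof
lemma pvRange'_cons (s k : Nat) : List.range' s (k + 1) = s :: List.range' (s + 1) k := rfl

-- needed by runStack's termination proof
lemma pvSumPow (k : Nat) : ∀ s : Nat,
    ((List.range' s k).map (fun i => 2 ^ (s + k - (i + 1)))).sum + 1 = 2 ^ k := by
  induction k with
  | zero => intro s; simp
  | succ k ih =>
    intro s
    rw [pvRange'_cons]
    have h2 : ∀ i, s + (k + 1) - (i + 1) = (s + 1) + k - (i + 1) := by omega
    simp only [List.map_cons, List.sum_cons]
    have := ih (s + 1)
    have he : ((List.range' (s+1) k).map (fun i => 2 ^ (s + (k+1) - (i + 1)))).sum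
        = ((List.range' (s+1) k).map (fun i => 2 ^ ((s+1) + k - (i + 1)))).sum := by
      congr 1
      apply List.map_congr_left
      intro i _
      rw [h2]
    rw [he]
    have hs : s + (k + 1) - (s + 1) = k := by omega
    rw [hs]
    omega

lemma pvMeasure_children (arr : List Int) (c : List Int) (s : Nat) :
    pvMeasure arr (stackChildren arr c s) < 2 ^ (arr.length - s) := by
  unfold pvMeasure stackChildren
  rw [List.map_map]
  by_cases h : s ≤ arr.length
  · have hk : s + (arr.length - s) = arr.length := by omega
    have := pvSumPow (arr.length - s) s
    rw [hk] at this
    have he : ((List.range' s (arr.length - s)).map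
        ((fun p : List Int × Nat => 2 ^ (arr.length - p.2)) ∘
          (fun i => (c ++ [arr.getD i 0], i + 1)))).sum
        = ((List.range' s (arr.length - s)).map (fun i => 2 ^ (arr.length - (i + 1)))).sum := by
      congr 1
    rw [he]
    omega
  · have : arr.length - s = 0 := by omega
    rw [this]
    simp

-- the while loop: pop (c, s), emit if len >= 2, push children
def runStack (arr : List Int) (st : List (List Int × Nat)) : List (List Int) :=
  match st with
  | [] => []
  | (c, s) :: rest =>
    (if 2 ≤ c.length then [c] else []) ++ runStack arr (stackChildren arr c s ++ rest)
  termination_by pvMeasure arr st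
  decreasing_by
    simp only [pvMeasure, List.map_append, List.sum_append, List.map_cons, List.sum_cons]
    have := pvMeasure_children arr c s
    unfold pvMeasure at this
    omega

def all_combinations_alt (arr : List Int) : List (List Int) :=
  runStack arr [([], 0)]

-- ===== PRECONDITION & SPEC =====
def Spec_all_combinations (arr : List Int) (out : List (List Int)) : Prop := out = all_combinations_alt arr
instance (arr : List Int) (out : List (List Int)) : Decidable (Spec_all_combinations arr out) := by unfold Spec_all_combinations; infer_instance

-- ===== CLAIM (what is proved, stated in full; the proofs are below) =====
def Claim_equal_all_combinations : Prop := ∀ (arr : List Int), Dom_all_combinations arr → Spec_all_combinations arr (all_combinations arr)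

-- ===== LEMMAS AND PROOFS =====

-- the children of a stack entry, flat-mapped through A's dfs, are A's loop body
lemma children_loop (arr : List Int) (c : List Int) : ∀ k s, arr.length - s = k →
    List.flatMap (fun p : List Int × Nat => btA arr p.2 p.1) (stackChildren arr c s)
      = btLoop arr s c := by
  intro k
  induction k generalizing c with
  | zero =>
    intro s hs
    unfold stackChildren
    rw [hs, btLoop]
    simp
    omega
  | succ k ih =>
    intro s hs
    have hlt : s < arr.length := by omega
    unfold stackChildren
    rw [hs, pvRange'_cons]
    have hk : arr.length - (s + 1) = k := by omega
    simp only [List.map_cons, List.flatMap_cons]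
    have := ih c (s + 1) hk
    unfold stackChildren at this
    rw [hk] at this
    rw [this]
    conv_rhs => rw [btLoop]
    simp [hlt]

-- running the stack machine = flat-mapping A's dfs over the stack entries
lemma run_flat (arr : List Int) : ∀ N st, pvMeasure arr st < N →
    runStack arr st = List.flatMap (fun p : List Int × Nat => btA arr p.2 p.1) st := by
  intro N
  induction N with
  | zero => intro st h; omega
  | succ N ih =>
    intro st h
    match st with
    | [] => rw [runStack]; simp
    | (c, s) :: rest =>
      rw [runStack]
      have hm : pvMeasure arr (stackChildren arr c s ++ rest) < N := by
        have h1 := pvMeasure_children arr c s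
        simp only [pvMeasure, List.map_append, List.sum_append, List.map_cons,
          List.sum_cons] at h h1 ⊢
        omega
      rw [ih _ hm]
      simp only [List.flatMap_append, List.flatMap_cons,
        children_loop arr c (arr.length - s) s rfl]
      rw [btA, List.append_assoc]

-- ===== VERDICT (by name: the statement is the Claim_ definition above) =====
theorem all_combinations_spec : Claim_equal_all_combinations := by
  intro arr _
  unfold Spec_all_combinations all_combinations all_combinations_alt
  rw [run_flat arr (pvMeasure arr [([], 0)] + 1) _ (by omega)]
  simp [btA]
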